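-- pv_equiv track=rewrite | github.com/DemidovEvg/geekbrains_python | work/light_words.py | foo
-- ===== SOURCE A (Python) =====
-- def foo(s):
--     """
--     Вначале делим строку на список кортежей,
--     [(смежная левая часть, часть для анализа, правая смежная часть)]
--     а далее логика следующая,
--     1) для трех и более нулей количество изменений равно остатку от деления на 3,
--     при этом крайние символы никогда не меняется, поэтому смежные части можно не анализировать
--
--     2) для двух и более единиц количество изменений равно остатку от деления на 2,
--     при этом когда количество единиц четное, то необходимо анализировать левую и правую
--     смежную часть, так как либо там, либо там появляется новый символ
--     """
--     # заменим гласные на 1, согласные на 0 для удобства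
--     s_with_one_and_zero = []
--     for i in range(len(s)):
--         if s[i] in ['a', 'e', 'i', 'o', 'u']:
--             s_with_one_and_zero.append('1')
--         else:
--             s_with_one_and_zero.append('0')
--     s_with_one_and_zero.append('')
--     piece = [s_with_one_and_zero[0]]
--     parts = []
--
--     for i in range(1, len(s_with_one_and_zero)):
--         if piece[0] == s_with_one_and_zero[i]:
--             piece.append(s_with_one_and_zero[i])
--         else:
--             parts.append(piece)
--             piece = [s_with_one_and_zero[i]]
--
--     left = ['']
--     left_body_right = []
--
--     for i in range(len(parts)):
--         if i < len(parts) - 1: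
--             right = parts[i+1]
--         else:
--             right = ['']
--         left_body_right.append( (left, parts[i], right) )
--         left = parts[i]
--
--     change_count = 0
--     for left, body, right in left_body_right:
--         if body[0:2] == ['1', '1']:
--             change_count += len(body)//2
--             if left != '':
--                 possible_change_left_delta = len(left)//3 - (len(left)+1)//3
--             else:
--                 possible_change_left_delta = 0
--
--             if right != '':
--                 possible_change_right_delta = len(right)//3 - (len(right)+1)//3
--             else:
--                 possible_change_right_delta = 0
--
--             if (possible_change_left_delta == 1 and
--                  possible_change_left_delta == possible_change_right_delta):
--                 change_count += 1
--         elif body[0:3] == ['0', '0', '0']: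
--             change_count += len(body)//3
--     return change_count
-- ===== SOURCE B (Python) =====
-- # Single streaming pass over the string: maintain the current run's class
-- # (vowel/consonant) and length; flush run_len//2 (vowel) or run_len//3
-- # (consonant) at each class change and once at the end. Simpler than A's
-- # build-runs-then-reprocess-with-neighbors pipeline (whose neighbor branch
-- # is unreachable).
-- def _contrib(is_vowel, run):
--     return run // 2 if is_vowel else run // 3
--
-- def foo(s):
--     total = 0
--     cls = None
--     run = 0
--     for ch in s:
--         c = ch in ('a', 'e', 'i', 'o', 'u')
--         if cls is None:
--             cls, run = c, 1
--         elif c == cls: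
--             run += 1
--         else:
--             total += _contrib(cls, run)
--             cls, run = c, 1
--     if cls is None:
--         return total
--     return total + _contrib(cls, run)
-- ===== Notes on version B (the rewrite author's own statement) =====
-- stated objective: simpler
-- what changed: B replaces A's three-stage pipeline (encode to '0'/'1' strings, build a run list, re-walk it with left/right neighbor triples whose '+1' neighbor branch is unreachable) by a single streaming pass that tracks the current run's class and length and adds run//2 (vowel run) or run//3 (consonant run) at each class change and at the end.
import Mathlib
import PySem

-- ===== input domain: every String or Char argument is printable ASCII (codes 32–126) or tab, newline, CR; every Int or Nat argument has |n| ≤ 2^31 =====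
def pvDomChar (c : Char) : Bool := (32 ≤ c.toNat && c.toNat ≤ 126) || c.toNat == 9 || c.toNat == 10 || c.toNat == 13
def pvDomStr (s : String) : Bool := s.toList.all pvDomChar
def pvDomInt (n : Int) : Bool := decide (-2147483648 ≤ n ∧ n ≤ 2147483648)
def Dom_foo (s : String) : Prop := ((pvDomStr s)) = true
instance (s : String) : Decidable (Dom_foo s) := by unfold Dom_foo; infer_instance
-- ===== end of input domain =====

-- B replaces A's build-runs-then-reprocess-with-neighbors pipeline by one streaming
-- pass that flushes run//2 (vowel run) or run//3 (consonant run) at each class change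
-- (objective: simpler).

-- ===== PORT A =====
-- piece/parts step: Python `if piece[0] == x: piece.append(x) else: parts.append(piece); piece=[x]`
-- (piece is never empty when indexed, so headD "" is exact)
def fooStepPiece (st : List String × List (List String)) (x : String) :
    List String × List (List String) :=
  if st.1.headD "" == x then (st.1 ++ [x], st.2) else ([x], st.2 ++ [st.1])

-- left_body_right step over `i in range(len(parts))`
def fooStepLBR (parts : List (List String))
    (st : List String × List (List String × List String × List String)) (i : Nat) :
    List String × List (List String × List String × List String) :=
  let right := if i < parts.length - 1 then parts.getD (i + 1) [] else [""]
  (parts.getD i [], st.2 ++ [(st.1, parts.getD i [], right)])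

-- change_count step: NOTE Python's `left != ''` / `right != ''` compare a LIST to a
-- string and are therefore always True, so the deltas are always computed.
def fooStepCount (cc : Int) (t : List String × List String × List String) : Int :=
  let (left, body, right) := t
  if body.take 2 = ["1", "1"] then
    let cc := cc + PySem.Int.floordiv (body.length : Int) 2
    let pl : Int := PySem.Int.floordiv (left.length : Int) 3 -
      PySem.Int.floordiv ((left.length : Int) + 1) 3
    let pr : Int := PySem.Int.floordiv (right.length : Int) 3 -
      PySem.Int.floordiv ((right.length : Int) + 1) 3
    if pl = 1 ∧ pl = pr then cc + 1 else cc
  else if body.take 3 = ["0", "0", "0"] then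
    cc + PySem.Int.floordiv (body.length : Int) 3
  else cc

def foo (s : String) : Int :=
  let bits : List String :=
    s.toList.map (fun c => if c ∈ ['a', 'e', 'i', 'o', 'u'] then "1" else "0")
  let z := bits ++ [""]
  match z with
  | [] => 0  -- unreachable: z always ends with ""
  | z0 :: ztail =>
    let pp := ztail.foldl fooStepPiece ([z0], [])
    let parts := pp.2
    let lbr := ((List.range parts.length).foldl (fooStepLBR parts) ([""], [])).2
    lbr.foldl fooStepCount 0

-- ===== PORT B =====
def fooContrib (isVowel : Bool) (run : Int) : Int :=
  if isVowel then PySem.Int.floordiv run 2 else PySem.Int.floordiv run 3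

def fooAltStep (st : Option Bool × Int × Int) (ch : Char) : Option Bool × Int × Int :=
  let c : Bool := decide (ch ∈ ['a', 'e', 'i', 'o', 'u'])
  match st with
  | (none, _, total) => (some c, 1, total)
  | (some cls, run, total) =>
    if c = cls then (some cls, run + 1, total)
    else (some c, 1, total + fooContrib cls run)

def foo_alt (s : String) : Int :=
  match s.toList.foldl fooAltStep (none, 0, 0) with
  | (none, _, total) => total
  | (some cls, run, total) => total + fooContrib cls run

-- ===== PRECONDITION & SPEC =====
def Spec_foo (s : String) (out : Int) : Prop := out = foo_alt s
instance (s : String) (out : Int) : Decidable (Spec_foo s out) := by unfold Spec_foo; infer_instance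

-- ===== CLAIM (what is proved, stated in full; the proofs are below) =====
def Claim_equal_foo : Prop := ∀ (s : String), Dom_foo s → Spec_foo s (foo s)

-- ===== LEMMAS AND PROOFS =====

-- run-length groups of a Bool list: current group is (h, k+1), completed groups emitted in order
def grp : List Bool → Bool → Nat → List (Bool × Nat)
  | [], h, k => [(h, k + 1)]
  | b :: t, h, k => if b = h then grp t h (k + 1) else (h, k + 1) :: grp t b 0

def sumf : List (Bool × Nat) → Int
  | [] => 0
  | p :: t => fooContrib p.1 (p.2 : Int) + sumf t

def encB (b : Bool) : String := if b then "1" else "0"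

def vow (c : Char) : Bool := decide (c ∈ ['a', 'e', 'i', 'o', 'u'])

-- contribution of one triple of A's final loop, as a function of the body only
def fcnt (body : List String) : Int :=
  if body.take 2 = ["1", "1"] then PySem.Int.floordiv (body.length : Int) 2
  else if body.take 3 = ["0", "0", "0"] then PySem.Int.floordiv (body.length : Int) 3
  else 0

-- the "+1" neighbor branch of A is dead: n//3 - (n+1)//3 is never 1
lemma fd3_not_one (n : Nat) :
    PySem.Int.floordiv (n : Int) 3 - PySem.Int.floordiv ((n : Int) + 1) 3 ≠ 1 := by
  have h1 : ((n : Int) + 1) = ((n + 1 : Nat) : Int) := by push_cast; ring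
  have a1 : PySem.Int.floordiv (n : Int) 3 = ((n / 3 : Nat) : Int) := by
    exact_mod_cast PySem.Int.floordiv_natCast n 3
  have a2 : PySem.Int.floordiv ((n : Int) + 1) 3 = (((n + 1) / 3 : Nat) : Int) := by
    rw [h1]; exact_mod_cast PySem.Int.floordiv_natCast (n + 1) 3
  rw [a1, a2]
  have h2 : n / 3 ≤ (n + 1) / 3 := Nat.div_le_div_right (Nat.le_succ n)
  omega

lemma stepCount_eq (cc : Int) (t : List String × List String × List String) :
    fooStepCount cc t = cc + fcnt t.2.1 := by
  obtain ⟨l, b, r⟩ := t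
  unfold fooStepCount fcnt
  by_cases h1 : b.take 2 = ["1", "1"]
  · simp only [if_pos h1]
    rw [if_neg]
    · intro hh; exact fd3_not_one l.length hh.1
  · by_cases h2 : b.take 3 = ["0", "0", "0"] <;> simp [h1, h2]

lemma foldl_count (ts : List (List String × List String × List String)) (cc : Int) :
    ts.foldl fooStepCount cc = cc + (ts.map (fun t => fcnt t.2.1)).sum := by
  induction ts generalizing cc with
  | nil => simp
  | cons t ts ih => rw [List.foldl_cons, stepCount_eq, ih]; simp; ring

lemma lbr_bodies (parts : List (List String)) (n : Nat) (hn : n ≤ parts.length) (left0 : List String) :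
    (((List.range n).foldl (fooStepLBR parts) (left0, [])).2).map (fun t => t.2.1)
      = parts.take n := by
  induction n with
  | zero => simp
  | succ n ih =>
    have hlt : n < parts.length := hn
    rw [List.range_succ, List.foldl_append, List.foldl_cons, List.foldl_nil,
        show ∀ st : List String × List (List String × List String × List String),
            fooStepLBR parts st n = (parts.getD n [],
              st.2 ++ [(st.1, parts.getD n [],
                if n < parts.length - 1 then parts.getD (n + 1) [] else [""])])
          from fun st => rfl]
    simp only [List.map_append, ih (le_of_lt hlt), List.map_cons, List.map_nil]
    rw [List.take_add_one, List.getElem?_eq_getElem hlt, List.getD_eq_getElem?_getD,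
        List.getElem?_eq_getElem hlt]
    simp

lemma parts_eq (bl : List Bool) (h : Bool) (k : Nat) (parts : List (List String)) :
    (((bl.map encB) ++ [""]).foldl fooStepPiece (List.replicate (k + 1) (encB h), parts)).2
      = parts ++ (grp bl h k).map (fun p => List.replicate p.2 (encB p.1)) := by
  induction bl generalizing h k parts with
  | nil =>
    cases h <;>
      simp [fooStepPiece, List.replicate_succ, grp, encB]
  | cons b t ih =>
    have hstep : ∀ (piece : List String) (ps : List (List String)) (x : String),
        fooStepPiece (piece, ps) x =
          if piece.headD "" == x then (piece ++ [x], ps) else ([x], ps ++ [piece]) :=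
      fun _ _ _ => rfl
    have hhead : (List.replicate (k + 1) (encB h)).headD "" = encB h := by
      rw [List.replicate_succ]; rfl
    have hbeq : (encB h == encB b) = (h == b) := by cases h <;> cases b <;> decide
    rw [List.map_cons, List.cons_append, List.foldl_cons, hstep, hhead, hbeq]
    by_cases hb : b = h
    · rw [hb, if_pos (by simp), ← List.replicate_succ', ih h (k + 1) parts]
      simp [grp]
    · rw [if_neg (by simp only [beq_iff_eq]; exact fun hh => hb hh.symm)]
      rw [show [encB b] = List.replicate (0 + 1) (encB b) from rfl,
          ih b 0 (parts ++ [List.replicate (k + 1) (encB h)])]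
      simp [grp, if_neg hb, List.append_assoc]

lemma grp_pos (l : List Bool) (h : Bool) (k : Nat) (p : Bool × Nat) (hp : p ∈ grp l h k) :
    1 ≤ p.2 := by
  induction l generalizing h k with
  | nil => simp [grp] at hp; simp [hp]
  | cons b t ih =>
    simp only [grp] at hp
    split at hp
    · exact ih _ _ hp
    · rcases List.mem_cons.mp hp with h' | h'
      · simp [h']
      · exact ih _ _ h'

lemma fcnt_replicate (b : Bool) (n : Nat) (hn : 1 ≤ n) :
    fcnt (List.replicate n (encB b)) = fooContrib b (n : Int) := by
  cases b
  · -- consonant run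
    match n, hn with
    | 1, _ => decide
    | 2, _ => decide
    | (m + 3), _ =>
      have ht2 : (List.replicate (m + 3) (encB false)).take 2 = ["0", "0"] := by
        rw [List.take_replicate, show min 2 (m + 3) = 2 from by omega]; rfl
      have ht3 : (List.replicate (m + 3) (encB false)).take 3 = ["0", "0", "0"] := by
        rw [List.take_replicate, show min 3 (m + 3) = 3 from by omega]; rfl
      simp [fcnt, fooContrib, ht2, ht3]
  · -- vowel run
    match n, hn with
    | 1, _ => decide
    | (m + 2), _ =>
      have ht2 : (List.replicate (m + 2) (encB true)).take 2 = ["1", "1"] := by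
        rw [List.take_replicate, show min 2 (m + 2) = 2 from by omega]; rfl
      simp [fcnt, fooContrib, ht2]

lemma map_fcnt_body (L : List (List String × List String × List String)) :
    List.map (fun t => fcnt t.2.1) L = List.map fcnt (List.map (fun t => t.2.1) L) := by
  rw [List.map_map]
  rfl

lemma sum_fcnt (gs : List (Bool × Nat)) (hpos : ∀ p ∈ gs, 1 ≤ p.2) :
    ((gs.map (fun p => List.replicate p.2 (encB p.1))).map fcnt).sum = sumf gs := by
  induction gs with
  | nil => simp [sumf]
  | cons p t ih =>
    simp only [List.map_cons, List.sum_cons, sumf]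
    rw [fcnt_replicate p.1 p.2 (hpos p (by simp)), ih (fun q hq => hpos q (by simp [hq]))]

-- B-side: the same step on the precomputed boolean class
def stepB (st : Option Bool × Int × Int) (c : Bool) : Option Bool × Int × Int :=
  match st with
  | (none, _, total) => (some c, 1, total)
  | (some cls, run, total) =>
    if c = cls then (some cls, run + 1, total)
    else (some c, 1, total + fooContrib cls run)

def finB : Option Bool × Int × Int → Int
  | (none, _, total) => total
  | (some cls, run, total) => total + fooContrib cls run

lemma Bgo (l : List Bool) (h : Bool) (k : Nat) (acc : Int) :
    finB (l.foldl stepB (some h, (k : Int) + 1, acc)) = acc + sumf (grp l h k) := by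
  induction l generalizing h k acc with
  | nil => simp [finB, grp, sumf]
  | cons b t ih =>
    simp only [List.foldl_cons, stepB, grp]
    by_cases hb : b = h
    · simp only [hb, if_true]
      have h' := ih h (k + 1) acc
      push_cast at h' ⊢
      convert h' using 3
    · simp only [if_neg hb, sumf]
      have h' := ih b 0 (acc + fooContrib h ((k : Int) + 1))
      push_cast at h' ⊢
      rw [h']
      ring

lemma foo_alt_eq (s : String) :
    foo_alt s = finB (s.toList.foldl fooAltStep (none, 0, 0)) := by
  unfold foo_alt finB
  rcases s.toList.foldl fooAltStep (none, 0, 0) with ⟨_ | c, r, t⟩ <;> rfl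

lemma enc_if (c : Char) :
    (if c ∈ ['a', 'e', 'i', 'o', 'u'] then "1" else "0") = encB (vow c) := by
  by_cases h : c ∈ ['a', 'e', 'i', 'o', 'u'] <;> simp [encB, vow, h]

-- ===== VERDICT (by name: the statement is the Claim_ definition above) =====
theorem foo_spec : Claim_equal_foo := by
  intro s _
  unfold Spec_foo
  rw [foo_alt_eq]
  cases hcs : s.toList with
  | nil =>
    simp [foo, hcs, finB]
  | cons c t =>
    have htail : t.map (fun c => if c ∈ ['a', 'e', 'i', 'o', 'u'] then "1" else "0")
        = (t.map vow).map encB := by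
      rw [List.map_map]
      exact List.map_congr_left fun x _ => enc_if x
    -- A side
    have hA : foo s = sumf (grp (t.map vow) (vow c) 0) := by
      simp only [foo, hcs, List.map_cons, enc_if, List.cons_append]
      have hparts := parts_eq (t.map vow) (vow c) 0 []
      rw [show List.replicate (0 + 1) (encB (vow c)) = [encB (vow c)] from rfl,
          List.nil_append, List.map_map] at hparts
      simp only [Function.comp_def] at hparts
      rw [hparts]
      rw [foldl_count, map_fcnt_body, lbr_bodies _ _ (le_refl _) _, List.take_length]
      rw [sum_fcnt _ (grp_pos (t.map vow) (vow c) 0)]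
      simp
    -- B side
    have hB : finB (List.foldl fooAltStep (none, 0, 0) (c :: t))
        = sumf (grp (t.map vow) (vow c) 0) := by
      rw [List.foldl_cons,
          show fooAltStep (none, 0, 0) c = (some (vow c), 1, 0) from rfl,
          show (fooAltStep : Option Bool × Int × Int → Char → Option Bool × Int × Int)
            = fun st ch => stepB st (vow ch) from funext fun st => funext fun ch => rfl,
          ← List.foldl_map]
      have hb0 := Bgo (t.map vow) (vow c) 0 0
      norm_num at hb0
      rw [hb0]
    rw [hA, hB]
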